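-- pv_equiv track=rewrite | github.com/tirtza-weinfeld/hippocampx | backend/scripts/problems/docstring_parser.py | _process_expressions_dict
-- ===== SOURCE A (Python) =====
-- def _process_expressions_dict(lines: list[str]) -> dict[str, str]:
--     """Parse expressions into quoted expression -> description mapping with multi-line support."""
--     result: dict[str, str] = {}
--     i = 0
--
--     while i < len(lines):
--         line = lines[i].rstrip()
--
--         # Skip empty lines
--         if not line.strip():
--             i += 1
--             continue
--
--         # Look for expression lines (wrapped in single quotes)
--         stripped_line = line.strip()
--         if stripped_line.startswith("'") and "': " in stripped_line:
--             # Find the closing quote followed by ': '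
--             quote_end = stripped_line.find("': ", 1)
--             if quote_end != -1:
--                 expr_part = stripped_line[:quote_end + 1]  # Include closing quote
--                 desc_part = stripped_line[quote_end + 3:]  # Skip "': "
--                 expr_clean = expr_part.strip().strip("'\"")
--
--                 # Start building the description
--                 description_lines = [desc_part.strip()] if desc_part.strip() else []
--             else:
--                 # Fallback - skip this line
--                 i += 1
--                 continue
--         elif ':' in line:
--             # Fallback for non-quoted expressions
--             expr_part, desc_part = line.split(':', 1)
--             expr_clean = expr_part.strip().strip("'\"")
--
--             # Start building the description
--             description_lines = [desc_part.strip()] if desc_part.strip() else []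
--         else:
--             # Line without proper format, skip it
--             i += 1
--             continue
--
--         # Get base indentation level for this expression
--         base_indent = len(line) - len(line.lstrip())
--
--         # Look ahead for continuation lines (more indented)
--         i += 1
--         while i < len(lines):
--             next_line = lines[i].rstrip()
--
--             # Empty line - include it and continue
--             if not next_line.strip():
--                 description_lines.append("")
--                 i += 1
--                 continue
--
--             next_indent = len(next_line) - len(next_line.lstrip())
--
--             # If this line is more indented than the base expression, it belongs to this expression
--             if next_indent > base_indent:
--                 description_lines.append(next_line)
--                 i += 1
--             else:
--                 # This line is at the same level or less indented, so it's a new expression or end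
--                 break
--
--         # Join all description lines and store
--         full_description = '\n'.join(description_lines).strip()
--         if full_description:
--             result[expr_clean] = full_description
--
--     return result
-- ===== SOURCE B (Python) =====
-- def _start_block(line):
--     """Parse a candidate header line; return (expr_clean, initial desc lines, base indent) or None."""
--     s = line.strip()
--     if s.startswith("'") and "': " in s:
--         q = s.find("': ", 1)
--         if q == -1:
--             return None
--         expr_clean = s[:q + 1].strip().strip("'\"")
--         d = s[q + 3:].strip()
--     elif ':' in line:
--         parts = line.split(':', 1)
--         if len(parts) != 2:
--             return None  # unreachable: ':' is in line
--         expr_clean = parts[0].strip().strip("'\"")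
--         d = parts[1].strip()
--     else:
--         return None
--     base = len(line) - len(line.lstrip())
--     return (expr_clean, [d] if d else [], base)
--
--
-- def _flush(current, result):
--     """Close the current block: join its lines, strip, store if non-empty."""
--     if current is not None:
--         expr_clean, desc_lines, _ = current
--         full = '\n'.join(desc_lines).strip()
--         if full:
--             result[expr_clean] = full
--
--
-- def _process_expressions_dict(lines: list[str]) -> dict[str, str]:
--     """Single forward pass with an open-block accumulator instead of nested index loops."""
--     result: dict[str, str] = {}
--     current = None  # (expr_clean, desc_lines, base_indent) of the open block
--     for raw in lines:
--         line = raw.rstrip()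
--         if not line.strip():
--             if current is not None:
--                 current[1].append("")
--             continue
--         indent = len(line) - len(line.lstrip())
--         if current is not None and indent > current[2]:
--             current[1].append(line)
--             continue
--         _flush(current, result)
--         current = _start_block(line)
--     _flush(current, result)
--     return result
-- ===== Notes on version B (the rewrite author's own statement) =====
-- stated objective: alternative
-- what changed: Replaced A's nested index-driven while loops (outer header scan plus inner look-ahead loop over i) by a single forward for-pass holding an open-block accumulator that is flushed into the dict when the next header or the end of input is reached.
import Mathlib
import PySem

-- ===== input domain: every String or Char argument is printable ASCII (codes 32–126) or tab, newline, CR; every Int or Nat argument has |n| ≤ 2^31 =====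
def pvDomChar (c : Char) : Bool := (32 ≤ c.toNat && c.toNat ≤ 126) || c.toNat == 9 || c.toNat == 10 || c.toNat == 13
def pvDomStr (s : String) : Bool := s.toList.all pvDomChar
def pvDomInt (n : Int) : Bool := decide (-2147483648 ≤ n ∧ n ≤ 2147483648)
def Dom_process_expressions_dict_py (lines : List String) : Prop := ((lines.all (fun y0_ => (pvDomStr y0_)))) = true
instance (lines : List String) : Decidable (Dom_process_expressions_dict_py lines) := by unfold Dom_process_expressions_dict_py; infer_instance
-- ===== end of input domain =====

set_option maxHeartbeats 1000000


-- B replaces A's nested index-driven while loops by a single forward pass over the lines with an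
-- open-block accumulator (flush on close); same return value, different decomposition (objective: alternative).

-- ===== PORT A =====
-- A's inner `while i < len(lines)` loop: collects continuation lines into `description_lines`,
-- returns (description_lines, remaining lines at the break).
def pvCollectA (rest : List String) (base : Int) (acc : List String) : List String × List String :=
  match rest with
  | [] => (acc, [])
  | l :: rs =>
    let next_line := PySem.Str.rstrip l
    if PySem.Str.strip next_line = "" then pvCollectA rs base (acc ++ [""])
    else
      let next_indent := PySem.Str.len next_line - PySem.Str.len (PySem.Str.lstrip next_line)
      if base < next_indent then pvCollectA rs base (acc ++ [next_line])
      else (acc, l :: rs)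

-- termination fact for pvGoA (cited in its decreasing_by)
theorem pvCollectA_snd_length (rest : List String) (base : Int) (acc : List String) :
    (pvCollectA rest base acc).2.length ≤ rest.length := by
  induction rest generalizing acc with
  | nil => simp [pvCollectA]
  | cons l rs ih =>
    simp only [pvCollectA]
    split_ifs
    · exact (ih _).trans (Nat.le_succ _)
    · exact (ih _).trans (Nat.le_succ _)
    · simp

-- A's outer while loop, consuming the list of lines and threading `result`.
def pvGoA (lines : List String) (result : PySem.Dict String String) : PySem.Dict String String :=
  match lines with
  | [] => result
  | l :: rs =>
    let line := PySem.Str.rstrip l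
    if PySem.Str.strip line = "" then pvGoA rs result
    else
      let stripped_line := PySem.Str.strip line
      if PySem.Str.startswith stripped_line "'" && PySem.Str.isIn "': " stripped_line then
        let quote_end := PySem.Str.findFrom stripped_line "': " 1
        if quote_end ≠ -1 then
          let expr_part := PySem.Str.slice stripped_line none (some (quote_end + 1))
          let desc_part := PySem.Str.slice stripped_line (some (quote_end + 3)) none
          let expr_clean := PySem.Str.stripChars (PySem.Str.strip expr_part) "'\""
          let description_lines := if PySem.Str.strip desc_part ≠ "" then [PySem.Str.strip desc_part] else []
          let base_indent := PySem.Str.len line - PySem.Str.len (PySem.Str.lstrip line)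
          let p := pvCollectA rs base_indent description_lines
          let full := PySem.Str.strip (PySem.Str.join "\n" p.1)
          pvGoA p.2 (if full ≠ "" then result.insert expr_clean full else result)
        else pvGoA rs result
      else if PySem.Str.isIn ":" line then
        match PySem.Str.splitMax? line ":" 1 with
        | some (expr_part :: desc_part :: _) =>
          let expr_clean := PySem.Str.stripChars (PySem.Str.strip expr_part) "'\""
          let description_lines := if PySem.Str.strip desc_part ≠ "" then [PySem.Str.strip desc_part] else []
          let base_indent := PySem.Str.len line - PySem.Str.len (PySem.Str.lstrip line)
          let p := pvCollectA rs base_indent description_lines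
          let full := PySem.Str.strip (PySem.Str.join "\n" p.1)
          pvGoA p.2 (if full ≠ "" then result.insert expr_clean full else result)
        | _ => pvGoA rs result  -- unreachable: ':' ∈ line ⇒ split yields two parts
      else pvGoA rs result
termination_by lines.length
decreasing_by
  all_goals simp only [List.length_cons]
  · omega
  · exact Nat.lt_succ_of_le (pvCollectA_snd_length rs _ _)
  · omega
  · exact Nat.lt_succ_of_le (pvCollectA_snd_length rs _ _)
  · omega
  · omega

def process_expressions_dict_py (lines : List String) : List (String × String) :=
  (pvGoA lines PySem.Dict.empty).items

-- ===== PORT B =====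
-- B's _start_block
def pvStartBlock (line : String) : Option (String × List String × Int) :=
  let s := PySem.Str.strip line
  let parsed :=
    if PySem.Str.startswith s "'" && PySem.Str.isIn "': " s then
      let q := PySem.Str.findFrom s "': " 1
      if q = -1 then none
      else
        some (PySem.Str.stripChars (PySem.Str.strip (PySem.Str.slice s none (some (q + 1)))) "'\"",
              PySem.Str.strip (PySem.Str.slice s (some (q + 3)) none))
    else if PySem.Str.isIn ":" line then
      match PySem.Str.splitMax? line ":" 1 with
      | some (e :: d :: _) => some (PySem.Str.stripChars (PySem.Str.strip e) "'\"", PySem.Str.strip d)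
      | _ => none  -- unreachable: ':' ∈ line
    else none
  match parsed with
  | none => none
  | some (expr_clean, d) =>
    some (expr_clean, if d ≠ "" then [d] else [],
          PySem.Str.len line - PySem.Str.len (PySem.Str.lstrip line))

-- B's _flush
def pvFlush (current : Option (String × List String × Int))
    (result : PySem.Dict String String) : PySem.Dict String String :=
  match current with
  | none => result
  | some (expr_clean, desc_lines, _) =>
    let full := PySem.Str.strip (PySem.Str.join "\n" desc_lines)
    if full ≠ "" then result.insert expr_clean full else result

-- B's loop body (one line of the single forward pass)
def pvStep (st : Option (String × List String × Int) × PySem.Dict String String) (raw : String) :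
    Option (String × List String × Int) × PySem.Dict String String :=
  let line := PySem.Str.rstrip raw
  if PySem.Str.strip line = "" then
    match st.1 with
    | some (e, ds, b) => (some (e, ds ++ [""], b), st.2)
    | none => st
  else
    let indent := PySem.Str.len line - PySem.Str.len (PySem.Str.lstrip line)
    match st.1 with
    | some (e, ds, b) =>
      if b < indent then (some (e, ds ++ [line], b), st.2)
      else (pvStartBlock line, pvFlush st.1 st.2)
    | none => (pvStartBlock line, pvFlush st.1 st.2)

def process_expressions_dict_py_alt (lines : List String) : List (String × String) :=
  let st := lines.foldl pvStep (none, PySem.Dict.empty)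
  (pvFlush st.1 st.2).items

-- ===== PRECONDITION & SPEC =====
def Spec_process_expressions_dict_py (lines : List String) (out : List (String × String)) : Prop := out = process_expressions_dict_py_alt lines
instance (lines : List String) (out : List (String × String)) : Decidable (Spec_process_expressions_dict_py lines out) := by unfold Spec_process_expressions_dict_py; infer_instance

-- ===== CLAIM (what is proved, stated in full; the proofs are below) =====
def Claim_equal_process_expressions_dict_py : Prop := ∀ (lines : List String), Dom_process_expressions_dict_py lines → Spec_process_expressions_dict_py lines (process_expressions_dict_py lines)

-- ===== LEMMAS AND PROOFS =====

-- Finish B's fold from a given state: run the remaining lines, then flush.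
def pvFinish (lines : List String)
    (st : Option (String × List String × Int) × PySem.Dict String String) : PySem.Dict String String :=
  let r := lines.foldl pvStep st
  pvFlush r.1 r.2

theorem pvFinish_cons (l : String) (ls : List String) (st) :
    pvFinish (l :: ls) st = pvFinish ls (pvStep st l) := by
  simp only [pvFinish, List.foldl_cons]

theorem pvFinish_nil_none (res : PySem.Dict String String) :
    pvFinish [] (none, res) = res := by
  simp only [pvFinish, List.foldl_nil, pvFlush]

theorem pvFinish_nil_some (e : String) (acc : List String) (base : Int)
    (res : PySem.Dict String String) :
    pvFinish [] (some (e, acc, base), res) = pvFlush (some (e, acc, base)) res := by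
  simp only [pvFinish, List.foldl_nil]

-- On a non-blank line, A's outer loop does exactly: parse the header (B's pvStartBlock），collect，flush.
theorem pvGoA_header (l : String) (rs : List String) (res : PySem.Dict String String)
    (hnb : ¬ PySem.Str.strip (PySem.Str.rstrip l) = "") :
    pvGoA (l :: rs) res =
      match pvStartBlock (PySem.Str.rstrip l) with
      | none => pvGoA rs res
      | some (e, dls0, b) =>
          pvGoA (pvCollectA rs b dls0).2 (pvFlush (some (e, (pvCollectA rs b dls0).1, b)) res) := by
  rw [pvGoA]
  rw [if_neg hnb]
  simp only [pvStartBlock]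
  by_cases h1 : (PySem.Str.startswith (PySem.Str.strip (PySem.Str.rstrip l)) "'" &&
      PySem.Str.isIn "': " (PySem.Str.strip (PySem.Str.rstrip l))) = true
  · rw [if_pos h1, if_pos h1]
    by_cases h2 : PySem.Str.findFrom (PySem.Str.strip (PySem.Str.rstrip l)) "': " 1 = -1
    · rw [if_neg (not_not_intro h2), if_pos h2]
    · rw [if_pos h2, if_neg h2]
      simp only [pvFlush]
  · rw [if_neg h1, if_neg h1]
    by_cases h3 : PySem.Str.isIn ":" (PySem.Str.rstrip l) = true
    · rw [if_pos h3, if_pos h3]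
      rcases h : PySem.Str.splitMax? (PySem.Str.rstrip l) ":" 1 with _ | ps
      · rfl
      · rcases ps with _ | ⟨e, _ | ⟨d, tl⟩⟩
        · rfl
        · rfl
        · simp only [pvFlush]
    · rw [if_neg h3, if_neg h3]

-- Main invariant, both fold states at once, by strong induction on the number of lines.
theorem pvKey : ∀ (n : Nat) (lines : List String), lines.length ≤ n →
    (∀ res, pvFinish lines (none, res) = pvGoA lines res) ∧
    (∀ e acc base res,
      pvFinish lines (some (e, acc, base), res) =
        pvGoA (pvCollectA lines base acc).2
          (pvFlush (some (e, (pvCollectA lines base acc).1, base)) res)) := by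
  intro n
  induction n with
  | zero =>
    intro lines hlen
    have : lines = [] := List.eq_nil_of_length_eq_zero (Nat.le_zero.mp hlen)
    subst this
    constructor
    · intro res
      rw [pvFinish_nil_none, pvGoA]
    · intro e acc base res
      rw [pvFinish_nil_some]
      simp [pvCollectA, pvGoA]
  | succ n ih =>
    intro lines hlen
    match lines with
    | [] =>
      constructor
      · intro res
        rw [pvFinish_nil_none, pvGoA]
      · intro e acc base res
        rw [pvFinish_nil_some]
        simp [pvCollectA, pvGoA]
    | l :: rs =>
      have hrs : rs.length ≤ n := by simpa using Nat.lt_succ_iff.mp (Nat.lt_of_lt_of_le (by simp) hlen)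
      -- shared step: from state (pvStartBlock line, res) the rest of B's run equals A on (l :: rs)
      have hstep : ∀ res, ¬ PySem.Str.strip (PySem.Str.rstrip l) = "" →
          pvFinish rs (pvStartBlock (PySem.Str.rstrip l), res) = pvGoA (l :: rs) res := by
        intro res hnb
        rw [pvGoA_header l rs res hnb]
        rcases h : pvStartBlock (PySem.Str.rstrip l) with _ | ⟨e, dls0, b⟩
        · exact (ih rs hrs).1 res
        · exact (ih rs hrs).2 e dls0 b res
      by_cases hb : PySem.Str.strip (PySem.Str.rstrip l) = ""
      · constructor
        · intro res
          rw [pvFinish_cons]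
          have hs : pvStep (none, res) l = (none, res) := by
            simp only [pvStep]; rw [if_pos hb]
          rw [hs, (ih rs hrs).1 res, pvGoA]
          simp [hb]
        · intro e acc base res
          rw [pvFinish_cons]
          have hs : pvStep (some (e, acc, base), res) l = (some (e, acc ++ [""], base), res) := by
            simp only [pvStep]; rw [if_pos hb]
          rw [hs, (ih rs hrs).2 e (acc ++ [""]) base res]
          have hc : pvCollectA (l :: rs) base acc = pvCollectA rs base (acc ++ [""]) := by
            rw [pvCollectA]; rw [if_pos hb]
          rw [hc]
      · constructor
        · intro res
          rw [pvFinish_cons]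
          have hs : pvStep (none, res) l = (pvStartBlock (PySem.Str.rstrip l), res) := by
            simp only [pvStep]; rw [if_neg hb]; simp only [pvFlush]
          rw [hs]
          exact hstep res hb
        · intro e acc base res
          by_cases hi : base < PySem.Str.len (PySem.Str.rstrip l) - PySem.Str.len (PySem.Str.lstrip (PySem.Str.rstrip l))
          · rw [pvFinish_cons]
            have hs : pvStep (some (e, acc, base), res) l =
                (some (e, acc ++ [PySem.Str.rstrip l], base), res) := by
              simp only [pvStep]; rw [if_neg hb, if_pos hi]
            rw [hs, (ih rs hrs).2 e (acc ++ [PySem.Str.rstrip l]) base res]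
            have hc : pvCollectA (l :: rs) base acc =
                pvCollectA rs base (acc ++ [PySem.Str.rstrip l]) := by
              rw [pvCollectA, if_neg hb]; simp only []; rw [if_pos hi]
            rw [hc]
          · rw [pvFinish_cons]
            have hs : pvStep (some (e, acc, base), res) l =
                (pvStartBlock (PySem.Str.rstrip l), pvFlush (some (e, acc, base)) res) := by
              simp only [pvStep]; rw [if_neg hb, if_neg hi]
            rw [hs]
            have hc : pvCollectA (l :: rs) base acc = (acc, l :: rs) := by
              rw [pvCollectA, if_neg hb]; simp only []; rw [if_neg hi]
            rw [hc]
            exact hstep (pvFlush (some (e, acc, base)) res) hb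

-- ===== VERDICT (by name: the statement is the Claim_ definition above) =====
theorem process_expressions_dict_py_spec : Claim_equal_process_expressions_dict_py := by
  intro lines _
  unfold Spec_process_expressions_dict_py process_expressions_dict_py process_expressions_dict_py_alt
  rw [show (let st := lines.foldl pvStep (none, PySem.Dict.empty); (pvFlush st.1 st.2).items)
        = (pvFinish lines (none, PySem.Dict.empty)).items from rfl,
      (pvKey lines.length lines le_rfl).1 PySem.Dict.empty]
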